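-- pv_equiv track=rewrite | github.com/Arnie016/erdos170 | src/sparse_ruler/research_report.py | _classify_missing_list
-- ===== SOURCE A (Python) =====
-- from typing import Dict, List
--
-- def _classify_missing_list(missing: List[int], N: int) -> Dict[str, int]:
--     counts = {"endpoint": 0, "mid_scaffold": 0, "other": 0}
--     lo_mid = int(0.45 * N)
--     hi_mid = int(0.75 * N)
--     for d in missing:
--         if d <= 2 or d >= N - 2:
--             counts["endpoint"] += 1
--         elif lo_mid <= d <= hi_mid:
--             counts["mid_scaffold"] += 1
--         else:
--             counts["other"] += 1
--     return counts
-- ===== SOURCE B (Python) =====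
-- from typing import Dict, List
--
-- def _classify_missing_list(missing: List[int], N: int) -> Dict[str, int]:
--     lo_mid = int(0.45 * N)
--     hi_mid = int(0.75 * N)
--     endpoint = sum(1 for d in missing if d <= 2 or d >= N - 2)
--     mid = sum(1 for d in missing
--               if not (d <= 2 or d >= N - 2) and lo_mid <= d <= hi_mid)
--     return {"endpoint": endpoint,
--             "mid_scaffold": mid,
--             "other": len(missing) - endpoint - mid}
-- ===== Notes on version B (the rewrite author's own statement) =====
-- stated objective: alternative
-- what changed: Replaces the single stateful if/elif/else loop over a counter dict with two predicate-counting passes (endpoint, mid-with-endpoint-excluded) and derives the third count by subtraction from the list length, building the result dict once at the end.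
import Mathlib
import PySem

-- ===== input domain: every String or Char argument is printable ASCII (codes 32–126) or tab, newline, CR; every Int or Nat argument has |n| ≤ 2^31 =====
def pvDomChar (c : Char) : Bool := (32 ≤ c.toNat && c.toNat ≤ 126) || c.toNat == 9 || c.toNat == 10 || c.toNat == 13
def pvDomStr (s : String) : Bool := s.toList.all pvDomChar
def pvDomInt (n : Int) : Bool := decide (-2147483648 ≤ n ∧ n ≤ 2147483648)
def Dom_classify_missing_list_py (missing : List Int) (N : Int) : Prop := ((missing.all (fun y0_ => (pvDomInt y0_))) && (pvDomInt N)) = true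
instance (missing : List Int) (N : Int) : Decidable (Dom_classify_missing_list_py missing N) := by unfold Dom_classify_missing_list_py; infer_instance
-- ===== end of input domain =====

-- B replaces A's single if/elif/else pass over a mutable counter dict by two predicate-counting
-- passes plus a subtraction for the third category (objective: alternative decomposition).


-- ===== PORT A =====
-- Exact model of Python's `int(c * N)` where c is the IEEE-754 double num/2^e (num odd or exact,
-- here 0.45 = 8106479329266893/2^54 and 0.75 = 3/2^2): the exact product num*N/2^e is rounded to
-- the nearest double (53-bit significand, ties to even) and then truncated toward zero.
-- Exact for |N| ≤ 2^31 (the stated domain): the product stays in the normal double range.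
def pvFloatMulTruncInt (num : Nat) (e : Nat) (N : Int) : Int :=
  let p : Int := (num : Int) * N
  if p = 0 then 0 else
    let ap := p.natAbs
    let L := Nat.log2 ap + 1
    let kt : Nat × Int :=
      if L ≤ 53 then (ap, -(e : Int))
      else
        let s := L - 53
        let k0 := ap >>> s
        let r := ap % 2 ^ s
        let half := 2 ^ (s - 1)
        (if half < r ∨ (r = half ∧ k0 % 2 = 1) then k0 + 1 else k0, (s : Int) - e)
    let mag : Nat := if 0 ≤ kt.2 then kt.1 * 2 ^ kt.2.toNat else kt.1 >>> (-kt.2).toNat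
  if 0 < p then (mag : Int) else -(mag : Int)

-- Port of A: counter dict, one pass with if/elif/else.
def classify_missing_list_py (missing : List Int) (N : Int) : List (String × Int) :=
  let counts : PySem.Dict String Int :=
    PySem.Dict.mk [("endpoint", 0), ("mid_scaffold", 0), ("other", 0)]
  let lo_mid := pvFloatMulTruncInt 8106479329266893 54 N
  let hi_mid := pvFloatMulTruncInt 3 2 N
  (missing.foldl (fun c d =>
    if d ≤ 2 ∨ N - 2 ≤ d then c.modify "endpoint" 0 (fun x => x + 1)
    else if lo_mid ≤ d ∧ d ≤ hi_mid then c.modify "mid_scaffold" 0 (fun x => x + 1)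
    else c.modify "other" 0 (fun x => x + 1)) counts).items

-- ===== PORT B =====
def classify_missing_list_py_alt (missing : List Int) (N : Int) : List (String × Int) :=
  let lo_mid := pvFloatMulTruncInt 8106479329266893 54 N
  let hi_mid := pvFloatMulTruncInt 3 2 N
  let endpoint : Int := missing.countP (fun d => decide (d ≤ 2 ∨ N - 2 ≤ d))
  let mid : Int := missing.countP
    (fun d => !decide (d ≤ 2 ∨ N - 2 ≤ d) && decide (lo_mid ≤ d ∧ d ≤ hi_mid))
  [("endpoint", endpoint), ("mid_scaffold", mid),
   ("other", (missing.length : Int) - endpoint - mid)]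

-- ===== PRECONDITION & SPEC =====
def Spec_classify_missing_list_py (missing : List Int) (N : Int) (out : List (String × Int)) : Prop := out = classify_missing_list_py_alt missing N
instance (missing : List Int) (N : Int) (out : List (String × Int)) : Decidable (Spec_classify_missing_list_py missing N out) := by unfold Spec_classify_missing_list_py; infer_instance

-- ===== CLAIM (what is proved, stated in full; the proofs are below) =====
def Claim_equal_classify_missing_list_py : Prop := ∀ (missing : List Int) (N : Int), Dom_classify_missing_list_py missing N → Spec_classify_missing_list_py missing N (classify_missing_list_py missing N)


-- ===== LEMMAS AND PROOFS =====

-- Evaluating A's counter-dict update on the concrete three-key dict, one lemma per key.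
theorem pv_modify_endpoint (a b c : Int) :
    (PySem.Dict.mk [("endpoint", a), ("mid_scaffold", b), ("other", c)]).modify "endpoint" 0 (fun x => x + 1)
    = PySem.Dict.mk [("endpoint", a + 1), ("mid_scaffold", b), ("other", c)] := by
  simp [PySem.Dict.modify, PySem.Dict.insert, PySem.Dict.getD, PySem.Dict.get?, PySem.Dict.contains]

theorem pv_modify_mid (a b c : Int) :
    (PySem.Dict.mk [("endpoint", a), ("mid_scaffold", b), ("other", c)]).modify "mid_scaffold" 0 (fun x => x + 1)
    = PySem.Dict.mk [("endpoint", a), ("mid_scaffold", b + 1), ("other", c)] := by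
  simp [PySem.Dict.modify, PySem.Dict.insert, PySem.Dict.getD, PySem.Dict.get?, PySem.Dict.contains]

theorem pv_modify_other (a b c : Int) :
    (PySem.Dict.mk [("endpoint", a), ("mid_scaffold", b), ("other", c)]).modify "other" 0 (fun x => x + 1)
    = PySem.Dict.mk [("endpoint", a), ("mid_scaffold", b), ("other", c + 1)] := by
  simp [PySem.Dict.modify, PySem.Dict.insert, PySem.Dict.getD, PySem.Dict.get?, PySem.Dict.contains]

-- A's loop, started from arbitrary counter values, yields those values plus the three
-- branch counts (the "other" count written as countP of the residual predicate).
theorem pv_loop_eq (N lo hi : Int) (ms : List Int) (a b c : Int) :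
    (ms.foldl (fun cd d =>
        if d ≤ 2 ∨ N - 2 ≤ d then cd.modify "endpoint" 0 (fun x => x + 1)
        else if lo ≤ d ∧ d ≤ hi then cd.modify "mid_scaffold" 0 (fun x => x + 1)
        else cd.modify "other" 0 (fun x => x + 1))
      (PySem.Dict.mk [("endpoint", a), ("mid_scaffold", b), ("other", c)])).items
    = [("endpoint", a + ms.countP (fun d => decide (d ≤ 2 ∨ N - 2 ≤ d))),
       ("mid_scaffold", b + ms.countP
          (fun d => !decide (d ≤ 2 ∨ N - 2 ≤ d) && decide (lo ≤ d ∧ d ≤ hi))),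
       ("other", c + ms.countP
          (fun d => !decide (d ≤ 2 ∨ N - 2 ≤ d) && !decide (lo ≤ d ∧ d ≤ hi)))] := by
  induction ms generalizing a b c with
  | nil => simp
  | cons d tl ih =>
    rw [List.foldl_cons]
    by_cases h1 : d ≤ 2 ∨ N - 2 ≤ d
    · rw [if_pos h1, pv_modify_endpoint, ih]
      simp only [List.countP_cons]
      rw [decide_eq_true h1]
      simp only [Bool.not_true, Bool.false_and, if_true, if_false,
        Bool.false_eq_true, List.cons.injEq, Prod.mk.injEq, true_and, and_true]
      push_cast
      omega
    · by_cases h2 : lo ≤ d ∧ d ≤ hi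
      · rw [if_neg h1, if_pos h2, pv_modify_mid, ih]
        simp only [List.countP_cons]
        rw [decide_eq_true h2, decide_eq_false h1]
        simp only [Bool.not_false, Bool.true_and, Bool.and_true, Bool.not_true,
          if_true, if_false, Bool.false_eq_true, List.cons.injEq, Prod.mk.injEq,
          true_and, and_true]
        push_cast
        omega
      · rw [if_neg h1, if_neg h2, pv_modify_other, ih]
        simp only [List.countP_cons]
        rw [decide_eq_false h2, decide_eq_false h1]
        simp only [Bool.not_false, Bool.and_false, Bool.and_true,
          if_true, if_false, Bool.false_eq_true, List.cons.injEq, Prod.mk.injEq,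
          true_and, and_true]
        push_cast
        omega

-- The three branch counts partition the list.
theorem pv_counts_partition (N lo hi : Int) (ms : List Int) :
    ms.countP (fun d => decide (d ≤ 2 ∨ N - 2 ≤ d))
      + ms.countP (fun d => !decide (d ≤ 2 ∨ N - 2 ≤ d) && decide (lo ≤ d ∧ d ≤ hi))
      + ms.countP (fun d => !decide (d ≤ 2 ∨ N - 2 ≤ d) && !decide (lo ≤ d ∧ d ≤ hi))
      = ms.length := by
  induction ms with
  | nil => simp
  | cons d tl ih =>
    simp only [List.countP_cons, List.length_cons]
    by_cases h1 : d ≤ 2 ∨ N - 2 ≤ d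
    · rw [decide_eq_true h1]
      simp only [Bool.not_true, Bool.false_and, if_true, if_false, Bool.false_eq_true]
      omega
    · by_cases h2 : lo ≤ d ∧ d ≤ hi
      · rw [decide_eq_true h2, decide_eq_false h1]
        simp only [Bool.not_false, Bool.true_and, Bool.and_true, Bool.not_true,
          if_true, if_false, Bool.false_eq_true]
        omega
      · rw [decide_eq_false h2, decide_eq_false h1]
        simp only [Bool.not_false, Bool.true_and, Bool.and_false,
          if_true, if_false, Bool.false_eq_true]
        omega

-- ===== VERDICT (by name: the statement is the Claim_ definition above) =====
theorem classify_missing_list_py_spec : Claim_equal_classify_missing_list_py := by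
  intro missing N _
  show _ = _
  unfold classify_missing_list_py classify_missing_list_py_alt
  rw [pv_loop_eq]
  have h := pv_counts_partition N (pvFloatMulTruncInt 8106479329266893 54 N)
    (pvFloatMulTruncInt 3 2 N) missing
  simp only [List.cons.injEq, Prod.mk.injEq, and_true, true_and, zero_add]
  push_cast at h ⊢
  omega
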